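-- pv_equiv track=rewrite | github.com/ivanchiao/RecommendSystemExperiment | CollaborativeFilterGCN/utility/helper.py | early_stopping
-- ===== SOURCE A (Python) =====
-- def early_stopping(evaluates, inval=10):
--     if len(evaluates) <= inval:
--         return False
--     else:
--         for i in range(len(evaluates) - inval - 1, len(evaluates) - 1):
--             if evaluates[i] < evaluates[i + 1]:
--                 return False
--         return True
-- ===== SOURCE B (Python) =====
-- def early_stopping(evaluates, inval=10):
--     if len(evaluates) <= inval:
--         return False
--     tail = evaluates[len(evaluates) - inval - 1:]
--     return tail == sorted(tail, reverse=True)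
-- ===== Notes on version B (the rewrite author's own statement) =====
-- stated objective: alternative
-- what changed: Replaces the index-based adjacent-pair scan with an early return by slicing the inspected tail window and comparing it to its reverse-sorted copy (non-increasing iff equal to sorted(.., reverse=True)).
import Mathlib
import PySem

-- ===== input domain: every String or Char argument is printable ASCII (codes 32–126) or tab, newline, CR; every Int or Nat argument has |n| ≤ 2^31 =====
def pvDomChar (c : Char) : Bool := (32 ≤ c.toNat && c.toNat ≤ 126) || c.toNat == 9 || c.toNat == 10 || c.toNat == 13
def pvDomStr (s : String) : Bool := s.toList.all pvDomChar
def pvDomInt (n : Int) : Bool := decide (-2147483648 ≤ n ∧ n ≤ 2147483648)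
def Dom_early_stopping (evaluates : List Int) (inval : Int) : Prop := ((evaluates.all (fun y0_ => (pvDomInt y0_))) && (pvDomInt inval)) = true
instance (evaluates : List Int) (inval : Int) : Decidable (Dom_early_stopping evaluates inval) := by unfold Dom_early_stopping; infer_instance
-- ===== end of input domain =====

-- B replaces A's index-based adjacent-pair scan by slicing the inspected tail window and
-- comparing it with its reverse-sorted copy (alternative decomposition, similar cost).

-- ===== PORT A =====
-- the for-loop with early return, over the same index range
def early_stopping_loop (evaluates : List Int) : List Int → Bool
  | [] => true
  | i :: rest =>
    if (PySem.List.pyGet? evaluates i).getD 0 < (PySem.List.pyGet? evaluates (i + 1)).getD 0 then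
      false
    else
      early_stopping_loop evaluates rest

def early_stopping (evaluates : List Int) (inval : Int) : Bool :=
  if (evaluates.length : Int) ≤ inval then
    false
  else
    early_stopping_loop evaluates
      (PySem.List.pyRange ((evaluates.length : Int) - inval - 1) ((evaluates.length : Int) - 1) 1)

-- ===== PORT B =====
def early_stopping_alt (evaluates : List Int) (inval : Int) : Bool :=
  if (evaluates.length : Int) ≤ inval then
    false
  else
    let tail := PySem.List.slice evaluates (some ((evaluates.length : Int) - inval - 1)) none
    decide (tail = PySem.List.sorted tail (fun x => x) true)

-- ===== PRECONDITION & SPEC =====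
def Spec_early_stopping (evaluates : List Int) (inval : Int) (out : Bool) : Prop := out = early_stopping_alt evaluates inval
instance (evaluates : List Int) (inval : Int) (out : Bool) : Decidable (Spec_early_stopping evaluates inval out) := by unfold Spec_early_stopping; infer_instance

-- ===== CLAIM (what is proved, stated in full; the proofs are below) =====
def Claim_equal_early_stopping : Prop := ∀ (evaluates : List Int) (inval : Int), Dom_early_stopping evaluates inval → Spec_early_stopping evaluates inval (early_stopping evaluates inval)

-- ===== LEMMAS AND PROOFS =====

-- adjacent non-increasing check, the common characterisation both sides are reduced to
def pvNonInc : List Int → Bool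
  | [] => true
  | [_] => true
  | a :: b :: t => !(a < b) && pvNonInc (b :: t)

theorem pvNonInc_iff_chain' (xs : List Int) :
    pvNonInc xs = true ↔ List.IsChain (fun a b : Int => b ≤ a) xs := by
  match xs with
  | [] => simp [pvNonInc]
  | [_] => simp [pvNonInc]
  | a :: b :: t =>
    have ih := pvNonInc_iff_chain' (b :: t)
    rw [List.isChain_cons_cons, ← ih]
    simp only [pvNonInc, Bool.and_eq_true, Bool.not_eq_true', decide_eq_false_iff_not, Int.not_lt]

-- B's sort-and-compare equals the adjacent check
theorem alt_core_eq_pvNonInc (xs : List Int) :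
    decide (xs = PySem.List.sorted xs (fun x => x) true) = pvNonInc xs := by
  by_cases h : xs = PySem.List.sorted xs (fun x => x) true
  · have hp : (PySem.List.sorted xs (fun x => x) true).Pairwise (fun a b : Int => b ≤ a) :=
      PySem.List.sorted_pairwise_rev xs (fun x => x) |>.imp (fun hle => hle)
    rw [← h] at hp
    have : pvNonInc xs = true := by
      rw [pvNonInc_iff_chain', List.isChain_iff_pairwise]; exact hp
    rw [this]; exact decide_eq_true h
  · have : ¬ pvNonInc xs = true := by
      intro hni
      apply h
      have hp : xs.Pairwise (fun a b : Int => b ≤ a) := by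
        rw [← List.isChain_iff_pairwise, ← pvNonInc_iff_chain']; exact hni
      exact (PySem.List.sorted_rev_eq_self_of_pairwise xs (fun x => x) hp).symm
    have hf : pvNonInc xs = false := by simpa using this
    rw [hf]; exact decide_eq_false h

-- A's loop over range(k, len-1) equals the adjacent check on drop k
theorem loop_eq_pvNonInc (l : List Int) (k : Nat) :
    early_stopping_loop l (PySem.List.pyRange (k : Int) ((l.length : Int) - 1) 1)
      = pvNonInc (l.drop k) := by
  by_cases hk : k + 1 < l.length
  · rw [PySem.List.pyRange_one_cons (by omega)]
    have hk0 : k < l.length := by omega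
    have hg1 : PySem.List.pyGet? l (k : Int) = some l[k] := by
      simp [PySem.List.pyGet?_natCast, List.getElem?_eq_getElem hk0]
    have hg2 : PySem.List.pyGet? l ((k : Int) + 1) = some l[k + 1] := by
      rw [PySem.List.pyGet?_of_nonneg l (by omega : (0:Int) ≤ (k : Int) + 1)]
      have h1 : ((k : Int) + 1).toNat = k + 1 := by omega
      rw [h1, List.getElem?_eq_getElem hk]
    have hd1 : l.drop k = l[k] :: l.drop (k + 1) := List.drop_eq_getElem_cons hk0
    have hd2 : l.drop (k + 1) = l[k + 1] :: l.drop (k + 2) := List.drop_eq_getElem_cons hk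
    have ih := loop_eq_pvNonInc l (k + 1)
    have hcast : ((k : Int) + 1) = ((k + 1 : Nat) : Int) := by push_cast; ring
    rw [early_stopping_loop, hg1, hg2, hd1, hd2]
    simp only [Option.getD_some]
    rw [hcast, ih, hd2]
    by_cases hlt : l[k] < l[k + 1] <;> simp [pvNonInc, hlt]
  · -- range empty, and drop k has at most one element
    rw [PySem.List.pyRange_one_eq_nil (by omega)]
    have hlen : (l.drop k).length ≤ 1 := by
      rw [List.length_drop]; omega
    match hd : l.drop k with
    | [] => simp [early_stopping_loop, pvNonInc]
    | [x] => simp [early_stopping_loop, pvNonInc]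
    | x :: y :: t => rw [hd] at hlen; simp at hlen
termination_by l.length - k

-- ===== VERDICT (by name: the statement is the Claim_ definition above) =====
theorem early_stopping_spec : Claim_equal_early_stopping := by
  intro evaluates inval _
  unfold Spec_early_stopping early_stopping early_stopping_alt
  by_cases hg : (evaluates.length : Int) ≤ inval
  · simp [hg]
  · simp only [hg, if_false]
    have hs : 0 ≤ (evaluates.length : Int) - inval - 1 := by omega
    set s : Int := (evaluates.length : Int) - inval - 1 with hs_def
    have hk : s = ((s.toNat : Nat) : Int) := (Int.toNat_of_nonneg hs).symm
    rw [PySem.List.slice_from evaluates hs]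
    rw [hk, loop_eq_pvNonInc evaluates s.toNat, alt_core_eq_pvNonInc]
    rw [Int.toNat_natCast]
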